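-- pv_equiv track=rewrite | github.com/kgryczan/excelbi_puzzles | Excel/522 Challenge.py | find_sum_consecutive
-- ===== SOURCE A (Python) =====
-- def find_sum_consecutive(n):
--     odd_numbers = list(range(1, n, 2))
--     for start in range(len(odd_numbers)):
--         for length in range(2, len(odd_numbers) - start + 1):
--             end = start + length - 1
--             if end > len(odd_numbers):
--                 break
--             current_sum = sum(odd_numbers[start:end])
--             if current_sum == n:
--                 return ', '.join(map(str, odd_numbers[start:end]))
--             if current_sum > n:
--                 break
--     return "NP"
-- ===== SOURCE B (Python) =====
-- def find_sum_consecutive(n):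
--     odds = list(range(1, n, 2))
--     L = len(odds)
--     lo = hi = 0
--     s = 0
--     while lo < L:
--         while hi < L and s < n:
--             s += odds[hi]
--             hi += 1
--         if s == n:
--             return ', '.join(map(str, odds[lo:hi]))
--         s -= odds[lo]
--         lo += 1
--     return "NP"
-- ===== Notes on version B (the rewrite author's own statement) =====
-- stated objective: faster
-- what changed: Replaces A's nested start/length scan that re-sums each slice with a single two-pointer sliding window keeping a running sum over the odd numbers.
-- intended difference: On n = 4 (the only such input): A's inner slice odd_numbers[start:end] is end-exclusive, so a window containing the last odd number is never summed and A returns 'NP', while B returns '1, 3' (1+3=4), the intended pair of consecutive odd numbers. — e.g. on find_sum_consecutive(4): A returns "NP", B returns "1, 3"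
import Mathlib
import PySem

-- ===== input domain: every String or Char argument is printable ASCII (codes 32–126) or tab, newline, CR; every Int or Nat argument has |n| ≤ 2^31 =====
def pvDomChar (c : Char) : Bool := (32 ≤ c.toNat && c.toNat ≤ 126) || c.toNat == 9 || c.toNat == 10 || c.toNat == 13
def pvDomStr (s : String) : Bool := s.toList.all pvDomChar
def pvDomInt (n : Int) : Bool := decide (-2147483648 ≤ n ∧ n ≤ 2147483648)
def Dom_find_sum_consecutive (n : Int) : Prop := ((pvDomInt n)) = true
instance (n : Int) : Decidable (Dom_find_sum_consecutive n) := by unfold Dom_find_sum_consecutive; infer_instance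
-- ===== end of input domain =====

-- B replaces A's nested start/length scan (each slice re-summed) by a linear two-pointer
-- sliding window with a running sum; B is measurably faster (asymptotic change).

-- ===== PORT A =====
-- inner 'for length in range(2, len(odds)-start+1)' loop, with its two 'break's as `none`
def aInner (n : Int) (odds : List Int) (start : Int) : List Int → Option String
  | [] => none
  | len :: rest =>
    let e := start + len - 1
    if e > (odds.length : Int) then none
    else
      let seg := PySem.List.slice odds (some start) (some e)
      if seg.sum = n then
        some (PySem.Str.join ", " (seg.map PySem.Int.toStr))
      else if seg.sum > n then none
      else aInner n odds start rest

-- outer 'for start in range(len(odds))' loop; `some r` from the inner loop is the `return`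
def aOuter (n : Int) (odds : List Int) : List Int → String
  | [] => "NP"
  | start :: rest =>
    match aInner n odds start (PySem.List.pyRange 2 ((odds.length : Int) - start + 1) 1) with
    | some r => r
    | none => aOuter n odds rest

def find_sum_consecutive (n : Int) : String :=
  let odds := PySem.List.pyRange 1 n 2
  aOuter n odds (PySem.List.pyRange 0 ((odds.length : Int)) 1)

-- ===== PORT B =====
-- inner 'while hi < L and s < n' of Source B; fuel = odds.length always suffices (hi ≤ L)
def bAdvance (n : Int) (odds : List Int) : Nat → Nat → Int → Nat × Int
  | 0, hi, s => (hi, s)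
  | fuel+1, hi, s =>
    if hi < odds.length ∧ s < n then bAdvance n odds fuel (hi+1) (s + odds.getD hi 0)
    else (hi, s)

-- outer 'while lo < L' of Source B; fuel = odds.length always suffices (lo ≤ L)
def bLoop (n : Int) (odds : List Int) : Nat → Nat → Nat → Int → String
  | 0, _, _, _ => "NP"
  | fuel+1, lo, hi, s =>
    if lo < odds.length then
      let p := bAdvance n odds odds.length hi s
      if p.2 = n then
        PySem.Str.join ", " ((PySem.List.slice odds (some (lo:Int)) (some (p.1:Int))).map PySem.Int.toStr)
      else bLoop n odds fuel (lo+1) p.1 (p.2 - odds.getD lo 0)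
    else "NP"

def find_sum_consecutive_alt (n : Int) : String :=
  let odds := PySem.List.pyRange 1 n 2
  bLoop n odds odds.length 0 0 0

-- ===== PRECONDITION & SPEC =====
-- On n = 4 (the only such input) A's end-exclusive slice odds[start:end] never sums a window
-- containing the last odd number, so A returns "NP"; B returns "1, 3" (1+3=4), the intended answer.
def D_find_sum_consecutive (n : Int) : Prop := n = 4
instance (n : Int) : Decidable (D_find_sum_consecutive n) := by unfold D_find_sum_consecutive; infer_instance

def Spec_find_sum_consecutive (n : Int) (out : String) : Prop :=
  ¬ D_find_sum_consecutive n → out = find_sum_consecutive_alt n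
instance (n : Int) (out : String) : Decidable (Spec_find_sum_consecutive n out) := by unfold Spec_find_sum_consecutive; infer_instance

def pvDiffWitness_find_sum_consecutive : Int := 4
def pvDiffWitnessOut_find_sum_consecutive : String × String := ("NP", "1, 3")

-- ===== CLAIM (what is proved, stated in full; the proofs are below) =====
def Claim_unchanged_find_sum_consecutive : Prop := ∀ (n : Int), Dom_find_sum_consecutive n → Spec_find_sum_consecutive n (find_sum_consecutive n)
def Claim_changed_find_sum_consecutive : Prop := Dom_find_sum_consecutive (pvDiffWitness_find_sum_consecutive) ∧ D_find_sum_consecutive (pvDiffWitness_find_sum_consecutive) ∧ find_sum_consecutive (pvDiffWitness_find_sum_consecutive) = pvDiffWitnessOut_find_sum_consecutive.1 ∧ find_sum_consecutive_alt (pvDiffWitness_find_sum_consecutive) = pvDiffWitnessOut_find_sum_consecutive.2 ∧ pvDiffWitnessOut_find_sum_consecutive.1 ≠ pvDiffWitnessOut_find_sum_consecutive.2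
def Claim_exact_find_sum_consecutive : Prop := ∀ (n : Int), Dom_find_sum_consecutive n → D_find_sum_consecutive n → find_sum_consecutive n ≠ find_sum_consecutive_alt n

-- ===== LEMMAS AND PROOFS =====

/-- the list of odd numbers `range(1, n, 2)` -/
def pvOdds (n : Int) : List Int := PySem.List.pyRange 1 n 2
/-- its length -/
def pvL (n : Int) : Nat := (pvOdds n).length
/-- number of odds in [1, n) -/
def pvM (n : Int) : Nat := if 1 < n then ((n - 1 + 2 - 1) / 2).toNat else 0

lemma pvOdds_eq (n : Int) :
    pvOdds n = (List.range (pvM n)).map (fun k : Nat => (1:Int) + 2*(k:Int)) := by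
  unfold pvOdds pvM
  rw [PySem.List.pyRange_of_pos 1 n (by norm_num)]

lemma pvL_eq_M (n : Int) : pvL n = pvM n := by
  unfold pvL; rw [pvOdds_eq]; simp

lemma pvL_int (n : Int) (h : 0 ≤ n) : (pvL n : Int) = n / 2 := by
  rw [pvL_eq_M]; unfold pvM
  split
  · omega
  · omega

/-- window predicate for B: the odds at indices `[s, e)` sum to `n` -/
def pvWin (n : Int) (s e : Nat) : Prop :=
  s < e ∧ e ≤ pvL n ∧ (e:Int)*e - (s:Int)*s = n

/-- window predicate for A: additionally `e < pvL n` (A never sums a window with the last odd) -/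
def pvWinA (n : Int) (s e : Nat) : Prop :=
  s < e ∧ e + 1 ≤ pvL n ∧ (e:Int)*e - (s:Int)*s = n

lemma sum_map_range' : ∀ (k s : Nat),
    ((List.range' s k).map (fun j : Nat => (1:Int) + 2*(j:Int))).sum
      = ((s+k : Nat):Int)*((s+k : Nat):Int) - (s:Int)*(s:Int) := by
  intro k
  induction k with
  | zero =>
    intro s
    have h0 : List.range' s 0 = [] := rfl
    rw [h0]
    simp only [List.map_nil, List.sum_nil]
    push_cast
    ring
  | succ k ih =>
    intro s
    rw [List.range'_succ]
    simp only [List.map_cons, List.sum_cons, ih (s+1)]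
    push_cast
    ring

lemma pvSliceSum (n : Int) (s e : Nat) (h1 : s ≤ e) (h2 : e ≤ pvL n) :
    (PySem.List.slice (pvOdds n) (some (s:Int)) (some (e:Int))).sum
      = (e:Int)*e - (s:Int)*s := by
  have h2' : e ≤ pvM n := by rwa [pvL_eq_M] at h2
  rw [PySem.List.slice_natCast, pvOdds_eq, ← List.map_drop, ← List.map_take,
    List.range_eq_range', List.drop_range']
  have hsplit : List.range' (0 + s * 1) (pvM n - s) = List.range' s (e - s) ++ List.range' (s + (e - s)) ((pvM n - s) - (e - s)) := by
    rw [List.range'_append_1]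
    congr 1 <;> omega
  rw [hsplit, List.take_left' (by simp), sum_map_range']
  congr 2 <;> omega

lemma pvOdds_getD (n : Int) (i : Nat) (h : i < pvL n) :
    (pvOdds n).getD i 0 = 1 + 2*(i:Int) := by
  have h' : i < pvM n := by rwa [pvL_eq_M] at h
  rw [pvOdds_eq]
  simp [List.getD_eq_getElem?_getD, h']

lemma pvWin_mono (s j e : Nat) (hj : j < e) :
    (j:Int)*j - (s:Int)*s < (e:Int)*e - (s:Int)*s := by
  have : (j:Int)*j < (e:Int)*e := by
    have hj' : (j:Int) < (e:Int) := by exact_mod_cast hj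
    nlinarith [Int.natCast_nonneg j]
  omega

lemma pvWin_iff (n : Int) (hn4 : n ≠ 4) (s e : Nat) :
    pvWin n s e ↔ pvWinA n s e := by
  constructor
  · rintro ⟨hse, heL, hsum⟩
    refine ⟨hse, ?_, hsum⟩
    have hn0 : 0 < n := by
      have := pvWin_mono s s e hse
      omega
    have hL2 : (pvL n : Int) = n / 2 := pvL_int n (le_of_lt hn0)
    have heL' : (e:Int) ≤ (pvL n : Int) := by exact_mod_cast heL
    have hmk : ((e:Int)+s) * ((e:Int)-s) = n := by
      have : ((e:Int)+s) * ((e:Int)-s) = (e:Int)*e - (s:Int)*s := by ring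
      rw [this, hsum]
    have hk1 : (1:Int) ≤ (e:Int)-s := by
      have : (s:Int) < (e:Int) := by exact_mod_cast hse
      omega
    have hkm : (e:Int)-s ≤ (e:Int)+s := by
      have : (0:Int) ≤ (s:Int) := Int.natCast_nonneg s
      omega
    have hpar : n % 2 = (((e:Int)+s) % 2) * (((e:Int)-s) % 2) % 2 := by
      rw [← hmk, Int.mul_emod]
    have hdiff : (((e:Int)+s) - ((e:Int)-s)) % 2 = 0 := by
      have : ((e:Int)+s) - ((e:Int)-s) = 2*s := by ring
      omega
    -- abbreviate
    have hgoal : (e:Int) + 1 ≤ (pvL n : Int) := by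
      set m : Int := (e:Int)+s with hm
      set k : Int := (e:Int)-s with hk
      by_cases hk1' : k = 1
      · -- window of size 1: its element is n itself, which is not in range(1,n,2)
        exfalso
        have hmn : m = n := by
          have := hmk
          rw [hk1'] at this
          omega
        omega
      · by_cases h22 : m = 2 ∧ k = 2
        · exfalso
          apply hn4
          rw [← hmk, h22.1, h22.2]
          norm_num
        · have hm2 := Int.emod_two_eq m
          have hk2 := Int.emod_two_eq k
          rcases hm2 with hm2 | hm2 <;> rcases hk2 with hk2 | hk2
          · -- both even
            by_cases hke : k = 2
            · -- k = 2 : m ≥ 4 and n = 2m, linear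
              have hm4 : 4 ≤ m := by
                rcases h22 with _
                omega
              have : m * 2 = n := by rw [← hmk, hke]
              omega
            · have hk4 : 4 ≤ k := by omega
              have hm4 : 4 ≤ m := by omega
              have : m + k + 2 ≤ m * k := by nlinarith [(m-2)*(k-2)]
              omega
          · exfalso; omega
          · exfalso; omega
          · -- both odd
            have hk3 : 3 ≤ k := by omega
            have hm3 : 3 ≤ m := by omega
            have : m + k + 3 ≤ m * k := by nlinarith [(m-3)*(k-3)]
            omega
    have := hgoal
    omega
  · rintro ⟨h1, h2, h3⟩
    exact ⟨h1, by omega, h3⟩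

-- the inner advance of B: runs to the first hi' with running sum ≥ n (or to the end)
lemma bAdvance_spec (n : Int) :
    ∀ (fuel s hi : Nat) (bs : Int), s ≤ hi → hi ≤ pvL n → pvL n - hi ≤ fuel →
    bs = (hi:Int)*hi - (s:Int)*s →
    hi ≤ (bAdvance n (pvOdds n) fuel hi bs).1 ∧
    (bAdvance n (pvOdds n) fuel hi bs).1 ≤ pvL n ∧
    (bAdvance n (pvOdds n) fuel hi bs).2
      = ((bAdvance n (pvOdds n) fuel hi bs).1 : Int)*((bAdvance n (pvOdds n) fuel hi bs).1 : Int) - (s:Int)*s ∧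
    ¬((bAdvance n (pvOdds n) fuel hi bs).1 < pvL n ∧ (bAdvance n (pvOdds n) fuel hi bs).2 < n) ∧
    (∀ j, hi ≤ j → j < (bAdvance n (pvOdds n) fuel hi bs).1 → (j:Int)*j - (s:Int)*s < n) := by
  intro fuel
  induction fuel with
  | zero =>
    intro s hi bs hshi hhiL hfuel hbs
    have hhi : hi = pvL n := by omega
    simp only [bAdvance]
    refine ⟨le_refl _, hhiL, hbs, ?_, ?_⟩
    · intro ⟨hlt, _⟩; omega
    · intro j hj1 hj2; omega
  | succ fuel ih =>
    intro s hi bs hshi hhiL hfuel hbs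
    simp only [bAdvance]
    by_cases h : hi < (pvOdds n).length ∧ bs < n
    · rw [if_pos h]
      have hhiL' : hi < pvL n := h.1
      have hbs' : bs + (pvOdds n).getD hi 0 = ((hi+1 : Nat):Int)*((hi+1 : Nat):Int) - (s:Int)*s := by
        rw [pvOdds_getD n hi hhiL', hbs]
        push_cast
        ring
      have := ih s (hi+1) (bs + (pvOdds n).getD hi 0) (by omega) (by omega) (by omega) hbs'
      refine ⟨by omega, this.2.1, this.2.2.1, this.2.2.2.1, ?_⟩
      intro j hj1 hj2
      rcases Nat.eq_or_lt_of_le hj1 with hj | hj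
      · -- j = hi : its prefix sum is bs < n
        have : (j:Int)*j - (s:Int)*s = bs := by rw [← hj, hbs]
        omega
      · exact this.2.2.2.2 j hj hj2
    · rw [if_neg h]
      refine ⟨le_refl _, hhiL, hbs, ?_, ?_⟩
      · intro hc
        exact h ⟨hc.1, hc.2⟩
      · intro j hj1 hj2; omega

-- A's inner loop finds the (unique) exact window at start s
lemma aInner_some (n : Int) (s e : Nat) (hw : pvWinA n s e) :
    ∀ (d c : Nat), s + c + 1 + d = e →
    aInner n (pvOdds n) (s:Int) (PySem.List.pyRange ((c:Int)+2) ((pvL n : Int) - s + 1) 1)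
      = some (PySem.Str.join ", " ((PySem.List.slice (pvOdds n) (some (s:Int)) (some (e:Int))).map PySem.Int.toStr)) := by
  have hlen : (pvOdds n).length = pvL n := rfl
  intro d
  induction d with
  | zero =>
    intro c hc
    have hc' : s + c + 1 = e := by omega
    subst hc'
    have hlt : ((c:Int)+2) < (pvL n : Int) - s + 1 := by
      have := hw.2.1
      omega
    rw [PySem.List.pyRange_one_cons hlt]
    simp only [aInner]
    have harg : (s:Int) + ((c:Int)+2) - 1 = ((s+c+1 : Nat):Int) := by push_cast; ring
    rw [harg, pvSliceSum n s (s+c+1) (by omega) (by omega)]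
    have hdead : ¬((((s+c+1 : Nat)):Int) > ((pvOdds n).length : Int)) := by
      have := hw.2.1
      omega
    rw [if_neg hdead, if_pos hw.2.2]
  | succ d ih =>
    intro c hc
    have hwe : s + c + 1 < e := by omega
    have hlt : ((c:Int)+2) < (pvL n : Int) - s + 1 := by
      have := hw.2.1
      omega
    rw [PySem.List.pyRange_one_cons hlt]
    simp only [aInner]
    have harg : (s:Int) + ((c:Int)+2) - 1 = ((s+c+1 : Nat):Int) := by push_cast; ring
    rw [harg, pvSliceSum n s (s+c+1) (by omega) (by omega)]
    have hmono := pvWin_mono s (s+c+1) e hwe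
    have hsum := hw.2.2
    have hdead : ¬((((s+c+1 : Nat)):Int) > ((pvOdds n).length : Int)) := by
      have := hw.2.1
      omega
    rw [if_neg hdead, if_neg (by omega : ¬(((s+c+1 : Nat):Int)*((s+c+1 : Nat):Int) - (s:Int)*s = n)),
      if_neg (by omega : ¬(((s+c+1 : Nat):Int)*((s+c+1 : Nat):Int) - (s:Int)*s > n))]
    have hstep : ((c:Int)+2) + 1 = (((c+1 : Nat)):Int)+2 := by push_cast; ring
    rw [hstep]
    exact ih (c+1) (by omega)

-- A's inner loop returns none when no exact window exists at start s
lemma aInner_none (n : Int) (s : Nat) (hno : ∀ e, ¬ pvWinA n s e) :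
    ∀ (d c : Nat), d = pvL n - (s + c + 1) →
    aInner n (pvOdds n) (s:Int) (PySem.List.pyRange ((c:Int)+2) ((pvL n : Int) - s + 1) 1)
      = none := by
  have hlen : (pvOdds n).length = pvL n := rfl
  intro d
  induction d with
  | zero =>
    intro c hc
    have hnil : (pvL n : Int) - s + 1 ≤ (c:Int)+2 := by omega
    rw [PySem.List.pyRange_one_eq_nil hnil]
    simp only [aInner]
  | succ d ih =>
    intro c hc
    have hwL : s + c + 1 < pvL n := by omega
    have hlt : ((c:Int)+2) < (pvL n : Int) - s + 1 := by omega
    rw [PySem.List.pyRange_one_cons hlt]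
    simp only [aInner]
    have harg : (s:Int) + ((c:Int)+2) - 1 = ((s+c+1 : Nat):Int) := by push_cast; ring
    rw [harg, pvSliceSum n s (s+c+1) (by omega) (by omega)]
    have hnw : ¬ pvWinA n s (s+c+1) := hno (s+c+1)
    have hne : ¬ (((s+c+1 : Nat):Int)*((s+c+1 : Nat):Int) - (s:Int)*s = n) := by
      intro hEq
      exact hnw ⟨by omega, by omega, hEq⟩
    have hdead : ¬((((s+c+1 : Nat)):Int) > ((pvOdds n).length : Int)) := by omega
    rw [if_neg hdead, if_neg hne]
    by_cases hgt : (((s+c+1 : Nat)):Int)*(((s+c+1 : Nat)):Int) - (s:Int)*s > n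
    · rw [if_pos hgt]
    · rw [if_neg hgt]
      have hstep : ((c:Int)+2) + 1 = (((c+1 : Nat)):Int)+2 := by push_cast; ring
      rw [hstep]
      exact ih (c+1) (by omega)

lemma pvL_pos_n (n : Int) (h : 0 < pvL n) : 2 ≤ n := by
  rw [pvL_eq_M] at h; unfold pvM at h
  split at h
  · omega
  · omega

-- the main induction: from start position s, with B's window state (hi, bs) invariant,
-- A's remaining outer loop and B's remaining loop agree
lemma pvMain (n : Int) (hn4 : n ≠ 4) :
    ∀ (d s hi fuel : Nat) (bs : Int),
    s ≤ pvL n → pvL n - s ≤ d → s ≤ hi → hi ≤ pvL n → pvL n - s ≤ fuel →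
    bs = (hi:Int)*hi - (s:Int)*s →
    (∀ j, s ≤ j → j < hi → (j:Int)*j - (s:Int)*s < n) →
    aOuter n (pvOdds n) (PySem.List.pyRange (s:Int) ((pvL n : Int)) 1)
      = bLoop n (pvOdds n) fuel s hi bs := by
  have hlen : (pvOdds n).length = pvL n := rfl
  intro d
  induction d with
  | zero =>
    intro s hi fuel bs hsL hd _ _ _ _ _
    have hs : s = pvL n := by omega
    rw [PySem.List.pyRange_one_eq_nil (by omega)]
    cases fuel with
    | zero => simp only [aOuter, bLoop]
    | succ f =>
      simp only [aOuter, bLoop]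
      rw [if_neg (by omega)]
  | succ d ih =>
    intro s hi fuel bs hsL hd hshi hhiL hfl hbs hprev
    by_cases hsl : s < pvL n
    · -- s < pvL n : one step of both loops
      have hn2 : 2 ≤ n := pvL_pos_n n (by omega)
      cases fuel with
      | zero => omega
      | succ f =>
        simp only [bLoop]
        rw [if_pos (by omega : s < (pvOdds n).length)]
        have hadv := bAdvance_spec n (pvOdds n).length s hi bs hshi hhiL (by omega) hbs
        set p := bAdvance n (pvOdds n) (pvOdds n).length hi bs with hp
        obtain ⟨h1, h2, h3, h4, h5⟩ := hadv
        have hprev' : ∀ j, s ≤ j → j < p.1 → (j:Int)*j - (s:Int)*s < n := by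
          intro j hj1 hj2
          rcases lt_or_ge j hi with h | h
          · exact hprev j hj1 h
          · exact h5 j h hj2
        have hship : s < p.1 := by
          rcases Nat.lt_or_ge s p.1 with h | h
          · exact h
          · exfalso
            have hps : p.1 = s := by omega
            have : p.2 = (s:Int)*s - (s:Int)*s := by rw [h3, hps]
            exact h4 ⟨by omega, by omega⟩
        rw [PySem.List.pyRange_one_cons (by omega : (s:Int) < (pvL n : Int))]
        simp only [aOuter]
        by_cases hwin : p.2 = n
        · -- exact window [s, p.1) found: both return it
          rw [if_pos hwin]
          have hW : pvWin n s p.1 := ⟨hship, h2, by rw [← h3]; exact hwin⟩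
          have hWA := (pvWin_iff n hn4 s p.1).1 hW
          have hins := aInner_some n s p.1 hWA (p.1 - s - 1) 0 (by omega)
          have h02 : (2 : Int) = ((0:Nat):Int) + 2 := by norm_num
          rw [hlen, h02, hins]
        · -- no exact window at s: both move on to s+1
          rw [if_neg hwin]
          have hno : ∀ e, ¬ pvWinA n s e := by
            intro e he
            obtain ⟨he1, he2, he3⟩ := he
            rcases lt_or_ge e p.1 with h | h
            · have := hprev' e (by omega) h
              omega
            · rcases Nat.eq_or_lt_of_le h with h' | h'
              · apply hwin
                rw [h3, h']
                omega
              · -- p.1 < e ≤ pvL n, so p.1 < pvL n and hence p.2 ≥ n; but sum at p.1 < sum at e = n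
                have hplL : p.1 < pvL n := by omega
                have hp2n : ¬ p.2 < n := fun hc => h4 ⟨hplL, hc⟩
                have := pvWin_mono s p.1 e h'
                omega
          have hinn := aInner_none n s hno (pvL n - (s + 0 + 1)) 0 rfl
          have h02 : (2 : Int) = ((0:Nat):Int) + 2 := by norm_num
          rw [hlen, h02, hinn]
          have hgetD : (pvOdds n).getD s 0 = 1 + 2*(s:Int) := pvOdds_getD n s hsl
          have hbs' : p.2 - (pvOdds n).getD s 0 = ((p.1:Nat):Int)*((p.1:Nat):Int) - ((s+1 : Nat):Int)*((s+1 : Nat):Int) := by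
            rw [hgetD, h3]
            push_cast
            ring
          have hcast : (s:Int) + 1 = ((s+1 : Nat):Int) := by push_cast; ring
          rw [hcast]
          apply ih (s+1) p.1 f (p.2 - (pvOdds n).getD s 0) (by omega) (by omega) (by omega) h2 (by omega) hbs'
          intro j hj1 hj2
          have hj := hprev' j (by omega) hj2
          have hsq : ((s+1 : Nat):Int)*((s+1 : Nat):Int) = (s:Int)*(s:Int) + 2*(s:Int) + 1 := by
            push_cast
            ring
          omega
    · -- s = pvL n : both terminate with "NP"
      have hs : s = pvL n := by omega
      rw [PySem.List.pyRange_one_eq_nil (by omega)]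
      cases fuel with
      | zero => simp only [aOuter, bLoop]
      | succ f =>
        simp only [aOuter, bLoop]
        rw [if_neg (by omega)]

lemma pvAB_eq (n : Int) (hn4 : n ≠ 4) :
    find_sum_consecutive n = find_sum_consecutive_alt n := by
  show aOuter n (PySem.List.pyRange 1 n 2) (PySem.List.pyRange 0 (((PySem.List.pyRange 1 n 2).length : Int)) 1)
      = bLoop n (PySem.List.pyRange 1 n 2) (PySem.List.pyRange 1 n 2).length 0 0 0
  have h := pvMain n hn4 (pvL n) 0 0 (pvL n) 0 (by omega) (by omega) (by omega) (by omega) (by omega)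
    (by simp) (by intro j h1 h2; omega)
  simpa [pvOdds, pvL] using h

-- ===== VERDICT (by name: the statement is the Claim_ definition above) =====
theorem find_sum_consecutive_spec : Claim_unchanged_find_sum_consecutive := by
  intro n _ hD
  exact pvAB_eq n hD

theorem find_sum_consecutive_changed : Claim_changed_find_sum_consecutive := by
  unfold Claim_changed_find_sum_consecutive; decide

theorem find_sum_consecutive_tight : Claim_exact_find_sum_consecutive := by
  intro n _ hD
  rw [show n = 4 from hD]
  decide
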